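-- pv_equiv track=rewrite | github.com/ParkInoh/Python-Elegance-Measure | server/public/4289.py | height_check
-- ===== SOURCE A (Python) =====
-- def height_check(mymatrix, n):
--     bingo_list=[0,0]
--     for w in range(n) :
--          count=0
--          count_list=[]
--          for i in range(n) :
--               if   mymatrix[w][i] == "0" :
--                 count_list.append(count)
--                 count  = 0
--               elif mymatrix[w][i] == "1" :
--                 count += 1
--
--          for k in range(len(count_list)):
--               if   count_list[k] == bingo_list[0] :
--                  bingo_list[1] += 1
--               elif count_list[k] > bingo_list[0]  :
--                  bingo_list[1] = 1
--                  bingo_list[0] = count_list[k]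
--               else :
--                   pass
--     return(bingo_list)
-- ===== SOURCE B (Python) =====
-- def height_check(mymatrix, n):
--     # Gather every recorded run length (runs ended by a "0"; trailing runs are
--     # not recorded, exactly as in the original scan), then reduce once.
--     runs = []
--     for w in range(n):
--         count = 0
--         for i in range(n):
--             if mymatrix[w][i] == "0":
--                 runs.append(count)
--                 count = 0
--             elif mymatrix[w][i] == "1":
--                 count += 1
--     if not runs:
--         return [0, 0]
--     mx = max(runs)
--     return [mx, runs.count(mx)]
-- ===== Notes on version B (the rewrite author's own statement) =====
-- stated objective: simpler
-- what changed: Replaces A's online max/frequency tracking (a stateful per-element merge loop threaded across rows) by gather-then-reduce: collect all recorded run lengths into one list and finish with max() and .count().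
import Mathlib
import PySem

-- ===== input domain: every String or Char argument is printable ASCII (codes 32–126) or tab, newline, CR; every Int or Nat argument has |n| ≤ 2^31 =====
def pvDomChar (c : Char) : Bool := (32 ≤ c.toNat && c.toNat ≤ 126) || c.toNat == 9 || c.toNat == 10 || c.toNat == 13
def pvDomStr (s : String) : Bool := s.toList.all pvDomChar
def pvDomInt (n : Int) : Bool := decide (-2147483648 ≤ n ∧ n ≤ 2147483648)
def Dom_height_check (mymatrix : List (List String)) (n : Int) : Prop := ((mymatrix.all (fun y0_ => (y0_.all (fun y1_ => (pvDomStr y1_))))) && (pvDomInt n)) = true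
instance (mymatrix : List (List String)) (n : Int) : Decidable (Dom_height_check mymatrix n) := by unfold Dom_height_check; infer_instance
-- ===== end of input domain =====

-- B replaces A's online max/frequency tracking by a gather-then-reduce over the list of all
-- recorded run lengths (objective: simpler).

-- ===== PORT A =====
-- mymatrix[w][i] (in range under Pre_; the getD defaults are never reached there)
def pvCell (mymatrix : List (List String)) (w i : Int) : String :=
  (PySem.List.pyGet? ((PySem.List.pyGet? mymatrix w).getD []) i).getD ""

-- the inner per-row scan step, identical in A and B (state = (count, count_list/runs))
def pvRowStep (mymatrix : List (List String)) (w : Int) (st : Int × List Int) (i : Int) :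
    Int × List Int :=
  if pvCell mymatrix w i = "0" then (0, st.2 ++ [st.1])
  else if pvCell mymatrix w i = "1" then (st.1 + 1, st.2)
  else st

-- A's third loop body: merge one recorded run into bingo_list = (max, freq)
def pvMerge (b : Int × Int) (k : Int) : Int × Int :=
  if k = b.1 then (b.1, b.2 + 1) else if k > b.1 then (k, 1) else b

def height_check (mymatrix : List (List String)) (n : Int) : List Int :=
  let bingo :=
    (PySem.List.pyRange 0 n 1).foldl (fun (bingo : Int × Int) w =>
      let scan := (PySem.List.pyRange 0 n 1).foldl (pvRowStep mymatrix w) (0, ([] : List Int))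
      (PySem.List.pyRange 0 (scan.2.length : Int) 1).foldl
        (fun b k => pvMerge b (PySem.List.pyGetD scan.2 k 0)) bingo)
      ((0 : Int), (0 : Int))
  [bingo.1, bingo.2]

-- ===== PORT B =====
def height_check_alt (mymatrix : List (List String)) (n : Int) : List Int :=
  let runs :=
    (PySem.List.pyRange 0 n 1).foldl (fun (runs : List Int) w =>
      ((PySem.List.pyRange 0 n 1).foldl (pvRowStep mymatrix w) ((0 : Int), runs)).2) []
  if runs = [] then [0, 0]
  else
    let mx := (PySem.List.max? runs (fun x => x)).getD 0
    [mx, PySem.List.count runs mx]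

-- ===== PRECONDITION & SPEC =====
-- Pre_ excludes exactly the inputs on which Python A raises IndexError: some visited row
-- index or column index out of range (matrix shorter than n, or a visited row shorter than n).
def Pre_height_check (mymatrix : List (List String)) (n : Int) : Prop :=
  n.toNat ≤ mymatrix.length ∧ ∀ row ∈ mymatrix.take n.toNat, n.toNat ≤ row.length
instance (mymatrix : List (List String)) (n : Int) : Decidable (Pre_height_check mymatrix n) := by
  unfold Pre_height_check; infer_instance

def pvWitness_height_check : List (List String) × Int := ([["1", "0"], ["0", "1"]], 2)

def Spec_height_check (mymatrix : List (List String)) (n : Int) (out : List Int) : Prop := out = height_check_alt mymatrix n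
instance (mymatrix : List (List String)) (n : Int) (out : List Int) : Decidable (Spec_height_check mymatrix n out) := by unfold Spec_height_check; infer_instance

-- ===== CLAIM (what is proved, stated in full; the proofs are below) =====
def Claim_equal_height_check : Prop := ∀ (mymatrix : List (List String)) (n : Int), Dom_height_check mymatrix n → Pre_height_check mymatrix n → Spec_height_check mymatrix n (height_check mymatrix n)

-- ===== LEMMAS AND PROOFS =====

-- the accumulator of the row scan is write-only: threading `acc` in equals appending afterwards
theorem pvRowScan_acc (m : List (List String)) (w : Int) (l : List Int) (c : Int)
    (acc : List Int) :
    l.foldl (pvRowStep m w) (c, acc) =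
      ((l.foldl (pvRowStep m w) (c, [])).1, acc ++ (l.foldl (pvRowStep m w) (c, [])).2) := by
  induction l generalizing c acc with
  | nil => simp
  | cons i t ih =>
    simp only [List.foldl_cons, pvRowStep]
    split_ifs with h1 h2
    · simp only [List.nil_append]
      rw [ih 0 (acc ++ [c]), ih 0 [c]]
      simp
    · exact ih (c + 1) acc
    · exact ih c acc

-- the runs recorded by one row scan (count_list of row w in A, also B's per-row contribution)
def pvRowRuns (m : List (List String)) (n w : Int) : List Int :=
  ((PySem.List.pyRange 0 n 1).foldl (pvRowStep m w) (0, [])).2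

-- all recorded runs, over all visited rows
def pvAllRuns (m : List (List String)) (n : Int) : List Int :=
  (PySem.List.pyRange 0 n 1).flatMap (fun w => pvRowRuns m n w)

-- per-row merge folds over the concatenation of the per-row run lists
theorem pvFold_rows (m : List (List String)) (n : Int) (l : List Int) (b : Int × Int) :
    l.foldl (fun b w => (pvRowRuns m n w).foldl pvMerge b) b =
      (l.flatMap (fun w => pvRowRuns m n w)).foldl pvMerge b := by
  induction l generalizing b with
  | nil => rfl
  | cons w t ih => simp [List.foldl_cons, ih, List.foldl_append]

-- run lengths are nonnegative
theorem pvRowScan_nonneg (m : List (List String)) (w : Int) (l : List Int) (c : Int)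
    (acc : List Int) (hc : 0 ≤ c) (hacc : ∀ x ∈ acc, 0 ≤ x) :
    0 ≤ (l.foldl (pvRowStep m w) (c, acc)).1 ∧
      ∀ x ∈ (l.foldl (pvRowStep m w) (c, acc)).2, 0 ≤ x := by
  induction l generalizing c acc with
  | nil => exact ⟨hc, hacc⟩
  | cons i t ih =>
    simp only [List.foldl_cons, pvRowStep]
    split_ifs with h1 h2
    · refine ih 0 (acc ++ [c]) le_rfl ?_
      intro x hx
      rcases List.mem_append.mp hx with h | h
      · exact hacc x h
      · simpa using (by simpa using h : x = c) ▸ hc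
    · exact ih (c + 1) acc (by omega) hacc
    · exact ih c acc hc hacc

theorem pvAllRuns_nonneg (m : List (List String)) (n : Int) :
    ∀ x ∈ pvAllRuns m n, 0 ≤ x := by
  intro x hx
  rcases List.mem_flatMap.mp hx with ⟨w, _, hxw⟩
  exact (pvRowScan_nonneg m w _ 0 [] le_rfl (by simp)).2 x hxw

-- characterization of A's merge fold
theorem pvFoldl_le_max (a : Int) (t : List Int) : a ≤ t.foldl max a := by
  induction t generalizing a with
  | nil => simp
  | cons y s ihs => exact le_trans (le_max_left a y) (ihs (max a y))

theorem pvMerge_fold (l : List Int) (b0 b1 : Int) :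
    l.foldl pvMerge (b0, b1) =
      (l.foldl max b0,
       if l.foldl max b0 > b0 then (l.count (l.foldl max b0) : Int)
       else b1 + (l.count b0 : Int)) := by
  induction l generalizing b0 b1 with
  | nil => simp
  | cons x t ih =>
    simp only [List.foldl_cons]
    by_cases h1 : x = b0
    · subst h1
      rw [show pvMerge (x, b1) x = (x, b1 + 1) from by simp [pvMerge], ih x (b1 + 1), max_self]
      have hge : x ≤ t.foldl max x := pvFoldl_le_max x t
      split_ifs with hgt
      · have hne : (x == t.foldl max x) = false := by simp; omega
        simp [List.count_cons, hne]
      · have hx : t.foldl max x = x := by omega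
        simp only [hx, List.count_cons, BEq.rfl, if_pos, Prod.mk.injEq]
        exact ⟨trivial, by push_cast; omega⟩
    · by_cases h2 : x > b0
      · rw [show pvMerge (b0, b1) x = (x, 1) from by simp [pvMerge, h1, h2], ih x 1,
           show max b0 x = x from by omega]
        have hge : x ≤ t.foldl max x := pvFoldl_le_max x t
        rw [if_pos (show t.foldl max x > b0 by omega)]
        split_ifs with hgt
        · have hne : (x == t.foldl max x) = false := by simp; omega
          simp [List.count_cons, hne]
        · have hx : t.foldl max x = x := by omega
          simp only [hx, List.count_cons, BEq.rfl, if_pos, Prod.mk.injEq]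
          exact ⟨trivial, by push_cast; omega⟩
      · rw [show pvMerge (b0, b1) x = (b0, b1) from by simp [pvMerge, h1, h2], ih b0 b1,
           show max b0 x = b0 from by omega]
        have hge : b0 ≤ t.foldl max b0 := pvFoldl_le_max b0 t
        split_ifs with hgt
        · have hne : (x == t.foldl max b0) = false := by simp; omega
          simp [List.count_cons, hne]
        · have hne : (x == b0) = false := by simp; omega
          simp [List.count_cons, hne]

-- A in closed form: fold pvMerge over all runs
theorem height_check_eq (m : List (List String)) (n : Int) :
    height_check m n =
      [((pvAllRuns m n).foldl pvMerge (0, 0)).1, ((pvAllRuns m n).foldl pvMerge (0, 0)).2] := by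
  simp only [height_check]
  rw [show (fun (bingo : Int × Int) (w : Int) =>
        (PySem.List.pyRange 0
            ((((PySem.List.pyRange 0 n 1).foldl (pvRowStep m w) (0, ([] : List Int))).2.length : Int)) 1).foldl
          (fun b k =>
            pvMerge b
              (PySem.List.pyGetD ((PySem.List.pyRange 0 n 1).foldl (pvRowStep m w) (0, ([] : List Int))).2 k 0))
          bingo)
      = (fun (b : Int × Int) (w : Int) => (pvRowRuns m n w).foldl pvMerge b) from
      funext fun b => funext fun w => by
        rw [PySem.List.foldl_pyRange_zero_pyGetD']
        rfl]
  rw [pvFold_rows]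
  rfl

-- B in closed form
theorem height_check_alt_eq (m : List (List String)) (n : Int) :
    height_check_alt m n =
      (if pvAllRuns m n = [] then [0, 0]
       else [(PySem.List.max? (pvAllRuns m n) (fun x => x)).getD 0,
             PySem.List.count (pvAllRuns m n) ((PySem.List.max? (pvAllRuns m n) (fun x => x)).getD 0)]) := by
  unfold height_check_alt
  have hruns :
      (PySem.List.pyRange 0 n 1).foldl (fun (runs : List Int) w =>
        ((PySem.List.pyRange 0 n 1).foldl (pvRowStep m w) ((0 : Int), runs)).2) [] =
      pvAllRuns m n := by
    unfold pvAllRuns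
    have : ∀ (l : List Int) (acc : List Int),
        l.foldl (fun (runs : List Int) w =>
          ((PySem.List.pyRange 0 n 1).foldl (pvRowStep m w) ((0 : Int), runs)).2) acc =
        acc ++ l.flatMap (fun w => pvRowRuns m n w) := by
      intro l
      induction l with
      | nil => simp
      | cons w t ih =>
        intro acc
        simp only [List.foldl_cons, List.flatMap_cons]
        rw [pvRowScan_acc, ih]
        simp [pvRowRuns, List.append_assoc]
    simpa using this (PySem.List.pyRange 0 n 1) []
  rw [hruns]

-- max? on a nonempty list of nonnegatives is the fold of max from 0
theorem pvMax_eq (l : List Int) (hne : l ≠ []) (hnn : ∀ x ∈ l, 0 ≤ x) :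
    (PySem.List.max? l (fun x => x)).getD 0 = l.foldl max 0 := by
  cases l with
  | nil => exact absurd rfl hne
  | cons x t =>
    rw [PySem.List.max?_id_cons]
    have hx : max 0 x = x := by
      have := hnn x (by simp); omega
    simp [hx]

-- ===== VERDICT (by name: the statement is the Claim_ definition above) =====
theorem height_check_spec : Claim_equal_height_check := by
  intro m n _hdom _hpre
  unfold Spec_height_check
  rw [height_check_eq, height_check_alt_eq, pvMerge_fold]
  set l := pvAllRuns m n with hl
  by_cases hne : l = []
  · simp [hne]
  · have hnn := pvAllRuns_nonneg m n
    rw [← hl] at hnn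
    rw [if_neg hne, pvMax_eq l hne hnn]
    have h0 : (0 : Int) ≤ l.foldl max 0 := by
      have : ∀ (a : Int) (t : List Int), a ≤ t.foldl max a := fun a t => by
        induction t generalizing a with
        | nil => simp
        | cons y s ihs => exact le_trans (le_max_left a y) (ihs (max a y))
      exact this 0 l
    split_ifs with hgt
    · simp [PySem.List.count]
    · have : l.foldl max 0 = 0 := by omega
      simp [this, PySem.List.count]
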